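-- pv_equiv track=rewrite | github.com/ONS-BOUSBIH/robotic-surgical-vision-thesis | src/yolo_preprocessing.py | parse_bboxes_for_frame_xywh
-- ===== SOURCE A (Python) =====
-- def parse_bboxes_for_frame_xywh(frame_bboxes):
--     """
--     Input: {"obj1": [x,y,w,h], "obj2": [...]}
--     Output: {"left": bbox_xywh, "right": bbox_xywh}
--     """
--     boxes = []
--     for bbox in frame_bboxes.values():
--         x1, y1, x2, y2 = xywh_to_xyxy(bbox)
--         cx = (x1 + x2) / 2.0
--         boxes.append((cx, bbox))
--
--     boxes = sorted(boxes, key=lambda x: x[0])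
--
--     return {
--         "left": boxes[0][1],
--         "right": boxes[1][1]
--     }
--
-- def xywh_to_xyxy(b):
--     x, y, w, h = b
--     return [x, y, x + w, y + h]
-- ===== SOURCE B (Python) =====
-- def parse_bboxes_for_frame_xywh(frame_bboxes):
--     # One pass: maintain the two boxes with smallest center-x (strict '<'
--     # preserves the stable-sort tie-breaking of the original).
--     best = None
--     second = None
--     for bbox in frame_bboxes.values():
--         x, y, w, h = bbox
--         cx = x + w / 2.0
--         if best is None or cx < best[0]:
--             best, second = (cx, bbox), best
--         elif second is None or cx < second[0]:
--             second = (cx, bbox)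
--     return {"left": best[1], "right": second[1]}
-- ===== Notes on version B (the rewrite author's own statement) =====
-- stated objective: alternative
-- what changed: Replaces build-all-pairs + stable sort + double index with a single pass that maintains the two smallest-center-x boxes (strict '<' keeps the stable tie order); asymptotically O(n) vs O(n log n), though CPython's C sort makes the difference unmeasurable here.
import Mathlib
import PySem

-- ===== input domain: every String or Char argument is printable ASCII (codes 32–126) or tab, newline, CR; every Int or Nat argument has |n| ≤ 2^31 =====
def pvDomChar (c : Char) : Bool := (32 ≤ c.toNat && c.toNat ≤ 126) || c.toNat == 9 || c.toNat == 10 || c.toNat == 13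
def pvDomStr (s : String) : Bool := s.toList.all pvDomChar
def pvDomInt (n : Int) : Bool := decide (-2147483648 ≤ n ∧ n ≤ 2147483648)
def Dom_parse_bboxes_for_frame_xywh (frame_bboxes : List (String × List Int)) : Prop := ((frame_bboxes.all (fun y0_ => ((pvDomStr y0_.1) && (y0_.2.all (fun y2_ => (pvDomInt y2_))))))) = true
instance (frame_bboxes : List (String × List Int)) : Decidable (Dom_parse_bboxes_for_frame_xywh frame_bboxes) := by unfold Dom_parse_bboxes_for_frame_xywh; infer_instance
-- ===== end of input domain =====

-- B replaces A's build-pairs + stable sort + index by a single pass keeping the two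
-- smallest-center-x boxes (objective: alternative algorithm; speed not measured as faster).
-- Python's float center (x1+x2)/2.0 is exact for |ints| ≤ 2^31, so it is modelled by Rat.

-- ===== PORT A =====
def pvXywhToXyxy (b : List Int) : List Int :=
  match b with
  | [x, y, w, h] => [x, y, x + w, y + h]
  | _ => []  -- Python raises ValueError (unpack) here; excluded by Pre_

def parse_bboxes_for_frame_xywh (frame_bboxes : List (String × List Int)) : List (String × List Int) :=
  let boxes : List (Rat × List Int) :=
    (PySem.Dict.ofList frame_bboxes).values.foldl (fun acc bbox =>
      let xyxy := pvXywhToXyxy bbox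
      let x1 := xyxy.getD 0 0
      let x2 := xyxy.getD 2 0
      let cx : Rat := (x1 + x2) / 2     -- exact model of (x1 + x2) / 2.0 on Dom
      acc ++ [(cx, bbox)]) []
  let sortedBoxes := PySem.List.sorted boxes (fun p => p.1) false
  match sortedBoxes with
  | b0 :: b1 :: _ => [("left", b0.2), ("right", b1.2)]
  | _ => []  -- boxes[0] / boxes[1] raises IndexError here; excluded by Pre_

-- ===== PORT B =====
def parse_bboxes_for_frame_xywh_alt (frame_bboxes : List (String × List Int)) : List (String × List Int) :=
  let st :=
    (PySem.Dict.ofList frame_bboxes).values.foldl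
      (fun (st : Option (Rat × List Int) × Option (Rat × List Int)) bbox =>
        match bbox with
        | [x, _y, w, _h] =>
          let cx : Rat := x + w / 2    -- exact model of x + w / 2.0 on Dom
          match st with
          | (none, _) => (some (cx, bbox), none)
          | (some b, none) =>
            if cx < b.1 then (some (cx, bbox), some b) else (some b, some (cx, bbox))
          | (some b, some s) =>
            if cx < b.1 then (some (cx, bbox), some b)
            else if cx < s.1 then (some b, some (cx, bbox))
            else (some b, some s)
        | _ => st)  -- Python raises ValueError (unpack) here; excluded by Pre_
      (none, none)
  match st with
  | (some b, some s) => [("left", b.2), ("right", s.2)]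
  | _ => []  -- Python raises (subscripting None) here; excluded by Pre_

-- ===== PRECONDITION & SPEC =====
-- Pre_: the dict holds at least two boxes and every box has exactly 4 numbers;
-- otherwise A raises (IndexError / ValueError on unpack) and returns nothing.
def Pre_parse_bboxes_for_frame_xywh (frame_bboxes : List (String × List Int)) : Prop :=
  2 ≤ (PySem.Dict.ofList frame_bboxes).values.length ∧
  ∀ v ∈ (PySem.Dict.ofList frame_bboxes).values, v.length = 4

instance (frame_bboxes : List (String × List Int)) : Decidable (Pre_parse_bboxes_for_frame_xywh frame_bboxes) := by
  unfold Pre_parse_bboxes_for_frame_xywh; infer_instance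

def pvWitness_parse_bboxes_for_frame_xywh : (List (String × List Int)) :=
  [("a", [0, 0, 2, 2]), ("b", [5, 0, 2, 2])]

def Spec_parse_bboxes_for_frame_xywh (frame_bboxes : List (String × List Int)) (out : List (String × List Int)) : Prop := out = parse_bboxes_for_frame_xywh_alt frame_bboxes
instance (frame_bboxes : List (String × List Int)) (out : List (String × List Int)) : Decidable (Spec_parse_bboxes_for_frame_xywh frame_bboxes out) := by unfold Spec_parse_bboxes_for_frame_xywh; infer_instance

-- ===== CLAIM (what is proved, stated in full; the proofs are below) =====
def Claim_equal_parse_bboxes_for_frame_xywh : Prop := ∀ (frame_bboxes : List (String × List Int)), Dom_parse_bboxes_for_frame_xywh frame_bboxes → Pre_parse_bboxes_for_frame_xywh frame_bboxes → Spec_parse_bboxes_for_frame_xywh frame_bboxes (parse_bboxes_for_frame_xywh frame_bboxes)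

-- ===== LEMMAS AND PROOFS =====

-- abstract single step of B's loop (on already-keyed pairs)
def pvStep (st : Option (Rat × List Int) × Option (Rat × List Int)) (p : Rat × List Int) :
    Option (Rat × List Int) × Option (Rat × List Int) :=
  match st with
  | (none, _) => (some p, none)
  | (some b, none) => if p.1 < b.1 then (some p, some b) else (some b, some p)
  | (some b, some s) =>
    if p.1 < b.1 then (some p, some b)
    else if p.1 < s.1 then (some b, some p)
    else (some b, some s)

-- the state B maintains, read off the first two elements of a list
def pvEnc (l : List (Rat × List Int)) : Option (Rat × List Int) × Option (Rat × List Int) :=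
  match l with
  | [] => (none, none)
  | [a] => (some a, none)
  | a :: b :: _ => (some a, some b)

def pvKey (b : List Int) : Rat :=
  match b with
  | [x, _, w, _] => x + w / 2
  | _ => 0

theorem pvEnc_insertBy (acc : List (Rat × List Int)) (p : Rat × List Int) :
    pvEnc (PySem.List.insertBy (fun a b => decide (a.1 < b.1)) p acc) = pvStep (pvEnc acc) p := by
  match acc with
  | [] => simp [PySem.List.insertBy, pvEnc, pvStep]
  | [a] =>
    simp only [PySem.List.insertBy, pvEnc, pvStep]
    split_ifs with h <;> simp_all
  | a :: b :: rest =>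
    simp only [PySem.List.insertBy, pvEnc, pvStep]
    split_ifs with h1 h2 <;> simp_all

theorem pvFold_enc (ps : List (Rat × List Int)) :
    ∀ acc : List (Rat × List Int),
      ps.foldl pvStep (pvEnc acc) =
        pvEnc (ps.foldl (fun acc x => PySem.List.insertBy (fun a b => decide (a.1 < b.1)) x acc) acc) := by
  induction ps with
  | nil => intro acc; rfl
  | cons p t ih =>
    intro acc
    simp only [List.foldl_cons]
    rw [← pvEnc_insertBy acc p, ih]

theorem pvFold_enc_sorted (ps : List (Rat × List Int)) :
    ps.foldl pvStep (none, none) = pvEnc (PySem.List.sorted ps (fun p => p.1) false) := by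
  rw [PySem.List.sorted_eq_foldl_insertBy]
  exact pvFold_enc ps []

-- A's pair-building loop is a map
theorem pvFoldA_map (vals : List (List Int)) :
    ∀ acc : List (Rat × List Int),
      vals.foldl (fun acc bbox =>
        acc ++ [(((pvXywhToXyxy bbox).getD 0 0 + (pvXywhToXyxy bbox).getD 2 0 : Rat) / 2, bbox)]) acc =
      acc ++ vals.map (fun bbox =>
        (((pvXywhToXyxy bbox).getD 0 0 + (pvXywhToXyxy bbox).getD 2 0 : Rat) / 2, bbox)) := by
  induction vals with
  | nil => intro acc; simp only [List.foldl_nil, List.map_nil, List.append_nil]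
  | cons v t ih =>
    intro acc
    rw [List.foldl_cons, ih, List.map_cons]
    simp

-- on 4-element boxes the two center formulas agree
theorem pvKey_eq (v : List Int) (hv : v.length = 4) :
    (((pvXywhToXyxy v).getD 0 0 + (pvXywhToXyxy v).getD 2 0 : Rat) / 2) = pvKey v := by
  match v, hv with
  | [x, y, w, h], _ =>
    simp [pvXywhToXyxy, pvKey]
    ring

-- B's loop equals the abstract pvStep fold over the keyed pairs
theorem pvFoldB (vals : List (List Int)) (h4 : ∀ v ∈ vals, v.length = 4) :
    ∀ st,
      vals.foldl
        (fun (st : Option (Rat × List Int) × Option (Rat × List Int)) bbox =>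
          match bbox with
          | [x, _y, w, _h] =>
            let cx : Rat := x + w / 2
            match st with
            | (none, _) => (some (cx, bbox), none)
            | (some b, none) =>
              if cx < b.1 then (some (cx, bbox), some b) else (some b, some (cx, bbox))
            | (some b, some s) =>
              if cx < b.1 then (some (cx, bbox), some b)
              else if cx < s.1 then (some b, some (cx, bbox))
              else (some b, some s)
          | _ => st) st =
      (vals.map (fun b => (pvKey b, b))).foldl pvStep st := by
  induction vals with
  | nil => intro st; rfl
  | cons v t ih =>
    intro st
    have hv : v.length = 4 := h4 v (by simp)
    have ht : ∀ u ∈ t, u.length = 4 := fun u hu => h4 u (by simp [hu])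
    match v, hv with
    | [x, y, w, h], _ =>
      simp only [List.foldl_cons, List.map_cons]
      rw [ih ht]
      rfl

-- ===== VERDICT (by name: the statement is the Claim_ definition above) =====
theorem parse_bboxes_for_frame_xywh_spec : Claim_equal_parse_bboxes_for_frame_xywh := by
  intro fb _hDom hPre
  obtain ⟨hlen, h4⟩ := hPre
  unfold Spec_parse_bboxes_for_frame_xywh parse_bboxes_for_frame_xywh parse_bboxes_for_frame_xywh_alt
  set vals := (PySem.Dict.ofList fb).values with hvals
  simp only
  rw [pvFoldA_map, pvFoldB vals h4, List.nil_append]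
  have hmap : vals.map (fun bbox =>
      (((pvXywhToXyxy bbox).getD 0 0 + (pvXywhToXyxy bbox).getD 2 0 : Rat) / 2, bbox)) =
      vals.map (fun b => (pvKey b, b)) := by
    apply List.map_congr_left
    intro v hv
    rw [pvKey_eq v (h4 v hv)]
  rw [hmap, pvFold_enc_sorted]
  have hl : 2 ≤ (PySem.List.sorted (vals.map (fun b => (pvKey b, b))) (fun p => p.1) false).length := by
    rw [PySem.List.length_sorted, List.length_map]
    exact hlen
  match hs : PySem.List.sorted (vals.map (fun b => (pvKey b, b))) (fun p => p.1) false, hl with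
  | a :: b :: rest, _ => rfl
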